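-- pv_equiv track=rewrite | github.com/OswaldoSobrevilla11/Desarrollo-de-aplicaciones-avanzadas-de-ciencias-computacionales | Actividad2_1.py | hopfield_recall
-- ===== SOURCE A (Python) =====
-- def hopfield_recall(entrada, W, max_iter=10):
--     estado = entrada[:]
--     for _ in range(max_iter):
--         for i in range(len(estado)):
--             # Calcular suma ponderada
--             suma = 0
--             for j in range(len(estado)):
--                 suma += W[i][j] * estado[j]
--
--             # Función signo
--             if suma >= 0:
--                 estado[i] = 1
--             else:
--                 estado[i] = -1
--     return estado
-- ===== SOURCE B (Python) =====
-- def hopfield_recall(entrada, W, max_iter=10):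
--     # Incremental-field variant: maintain h = W . estado and update it only on flips.
--     estado = entrada[:]
--     n = len(estado)
--     if max_iter <= 0:
--         return estado
--     h = [sum(W[i][j] * estado[j] for j in range(n)) for i in range(n)]
--     for _ in range(max_iter):
--         for i in range(n):
--             new = 1 if h[i] >= 0 else -1
--             if new != estado[i]:
--                 delta = new - estado[i]
--                 estado[i] = new
--                 h = [h[j] + W[j][i] * delta for j in range(n)]
--     return estado
-- ===== Notes on version B (the rewrite author's own statement) =====
-- stated objective: alternative
-- what changed: B precomputes the field vector h = W·estado once and maintains it incrementally on neuron flips (h[j] += W[j][i]*delta), instead of recomputing each neuron's full weighted sum on every visit.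
import Mathlib
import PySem

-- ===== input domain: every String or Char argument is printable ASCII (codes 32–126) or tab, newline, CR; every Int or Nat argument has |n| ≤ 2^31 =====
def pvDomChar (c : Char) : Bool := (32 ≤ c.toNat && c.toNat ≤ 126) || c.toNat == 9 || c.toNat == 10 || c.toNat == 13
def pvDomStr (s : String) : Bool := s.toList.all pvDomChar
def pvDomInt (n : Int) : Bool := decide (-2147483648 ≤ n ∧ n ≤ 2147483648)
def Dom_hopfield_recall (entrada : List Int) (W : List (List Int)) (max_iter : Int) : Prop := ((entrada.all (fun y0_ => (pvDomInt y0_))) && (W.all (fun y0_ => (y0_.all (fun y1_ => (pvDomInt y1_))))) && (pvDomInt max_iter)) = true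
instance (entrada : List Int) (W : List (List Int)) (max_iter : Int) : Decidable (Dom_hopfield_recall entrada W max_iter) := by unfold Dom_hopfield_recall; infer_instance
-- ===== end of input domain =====

-- B maintains the field vector h = W·estado incrementally (updated only on flips)
-- instead of recomputing each neuron's weighted sum; same sweep order and sign rule.

-- ===== PORT A =====
-- inner j-loop: suma = Σ_j W[i][j]*estado[j]
def pvDotA (row est : List Int) : Int :=
  (List.range est.length).foldl (fun s j => s + row.getD j 0 * est.getD j 0) 0

-- one sweep: for i in range(len(estado)): estado[i] = sign(suma)
def pvSweepA (W : List (List Int)) (est : List Int) : List Int :=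
  (List.range est.length).foldl
    (fun e i => e.set i (if pvDotA (W.getD i []) e ≥ 0 then 1 else -1)) est

def hopfield_recall (entrada : List Int) (W : List (List Int)) (max_iter : Int) : List Int :=
  (List.range max_iter.toNat).foldl (fun e _ => pvSweepA W e) entrada

-- ===== PORT B =====
-- h = [sum(W[i][j]*estado[j] for j in range(n)) for i in range(n)]
def pvInitH (W : List (List Int)) (est : List Int) : List Int :=
  (List.range est.length).map
    (fun i => ((List.range est.length).map
      (fun j => (W.getD i []).getD j 0 * est.getD j 0)).sum)

-- body of the i-loop on the state (estado, h)
def pvStepB (W : List (List Int)) (n : Nat) (s : List Int × List Int) (i : Nat) :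
    List Int × List Int :=
  let est := s.1; let h := s.2
  let new : Int := if h.getD i 0 ≥ 0 then 1 else -1
  if new ≠ est.getD i 0 then
    let delta := new - est.getD i 0
    (est.set i new,
     (List.range n).map (fun j => h.getD j 0 + (W.getD j []).getD i 0 * delta))
  else (est, h)

def hopfield_recall_alt (entrada : List Int) (W : List (List Int)) (max_iter : Int) : List Int :=
  let n := entrada.length
  if max_iter ≤ 0 then entrada
  else
    ((List.range max_iter.toNat).foldl
      (fun s _ => (List.range n).foldl (pvStepB W n) s)
      (entrada, pvInitH W entrada)).1

-- ===== PRECONDITION & SPEC =====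
-- Pre_: exactly where the Python A returns (it raises IndexError when some sweep reads
-- W[i][j] outside W: needs ≥ n rows whose first n all have length ≥ n, unless no read happens).
def Pre_hopfield_recall (entrada : List Int) (W : List (List Int)) (max_iter : Int) : Prop :=
  entrada = [] ∨ max_iter ≤ 0 ∨
    (entrada.length ≤ W.length ∧
      ∀ row ∈ W.take entrada.length, entrada.length ≤ row.length)
instance (entrada : List Int) (W : List (List Int)) (max_iter : Int) : Decidable (Pre_hopfield_recall entrada W max_iter) := by unfold Pre_hopfield_recall; infer_instance

def pvWitness_hopfield_recall : List Int × List (List Int) × Int :=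
  ([1, -1], [[0, 1], [1, 0]], 3)

def Spec_hopfield_recall (entrada : List Int) (W : List (List Int)) (max_iter : Int) (out : List Int) : Prop := out = hopfield_recall_alt entrada W max_iter
instance (entrada : List Int) (W : List (List Int)) (max_iter : Int) (out : List Int) : Decidable (Spec_hopfield_recall entrada W max_iter out) := by unfold Spec_hopfield_recall; infer_instance

-- ===== CLAIM (what is proved, stated in full; the proofs are below) =====
def Claim_equal_hopfield_recall : Prop := ∀ (entrada : List Int) (W : List (List Int)) (max_iter : Int), Dom_hopfield_recall entrada W max_iter → Pre_hopfield_recall entrada W max_iter → Spec_hopfield_recall entrada W max_iter (hopfield_recall entrada W max_iter)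

-- ===== LEMMAS AND PROOFS =====

def pvField (W : List (List Int)) (n : Nat) (est : List Int) (i : Nat) : Int :=
  ((List.range n).map (fun j => (W.getD i []).getD j 0 * est.getD j 0)).sum

lemma pvSum_range_eq (n : Nat) (f : Nat → Int) :
    ((List.range n).map f).sum = ∑ j ∈ Finset.range n, f j := by
  induction n with
  | zero => simp
  | succ m ih => simp [List.range_succ, Finset.sum_range_succ, ih]

lemma pvGetD_set_ne (l : List Int) (i j : Nat) (v : Int) (h : j ≠ i) :
    (l.set i v).getD j 0 = l.getD j 0 := by
  simp [List.getD_eq_getElem?_getD, List.getElem?_set_ne (Ne.symm h)]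

lemma pvGetD_set_self (l : List Int) (i : Nat) (v : Int) (h : i < l.length) :
    (l.set i v).getD i 0 = v := by
  simp [List.getD_eq_getElem?_getD, h]

lemma pvSet_getD_self (l : List Int) (i : Nat) (h : i < l.length) :
    l.set i (l.getD i 0) = l := by
  simp [List.getD_eq_getElem?_getD, h]

lemma pvField_set (W : List (List Int)) (n : Nat) (est : List Int) (hl : est.length = n)
    (i : Nat) (hi : i < n) (v : Int) (k : Nat) :
    pvField W n (est.set i v) k
      = pvField W n est k + (W.getD k []).getD i 0 * (v - est.getD i 0) := by
  unfold pvField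
  rw [pvSum_range_eq, pvSum_range_eq]
  have hstep : ∀ j ∈ Finset.range n,
      (W.getD k []).getD j 0 * (est.set i v).getD j 0
        = (W.getD k []).getD j 0 * est.getD j 0
          + (if j = i then (W.getD k []).getD i 0 * (v - est.getD i 0) else 0) := by
    intro j _
    by_cases hj : j = i
    · subst hj
      rw [pvGetD_set_self est j v (by omega)]
      simp
      ring
    · rw [pvGetD_set_ne est i j v hj]
      simp [hj]
  rw [Finset.sum_congr rfl hstep, Finset.sum_add_distrib, Finset.sum_ite_eq' (Finset.range n)]
  simp [Finset.mem_range.mpr hi]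




def pvInv (W : List (List Int)) (n : Nat) (s : List Int × List Int) : Prop :=
  s.1.length = n ∧ s.2 = (List.range n).map (pvField W n s.1)

lemma pvFoldl_add_sum (f : Nat → Int) (l : List Nat) (s : Int) :
    l.foldl (fun a j => a + f j) s = s + (l.map f).sum := by
  induction l generalizing s with
  | nil => simp
  | cons x xs ih => simp [ih, add_assoc]

lemma pvDotA_eq_field (W : List (List Int)) (est : List Int) (i : Nat) :
    pvDotA (W.getD i []) est = pvField W est.length est i := by
  simp [pvDotA, pvField, pvFoldl_add_sum]

lemma pvStepB_step (W : List (List Int)) (n : Nat) (s : List Int × List Int)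
    (hInv : pvInv W n s) (i : Nat) (hi : i < n) :
    pvStepB W n s i
      = (s.1.set i (if pvDotA (W.getD i []) s.1 ≥ 0 then 1 else -1),
         (List.range n).map (pvField W n
           (s.1.set i (if pvDotA (W.getD i []) s.1 ≥ 0 then 1 else -1))))
    ∧ pvInv W n (pvStepB W n s i) := by
  obtain ⟨hl, hh⟩ := hInv
  have hdot : pvDotA (W.getD i []) s.1 = pvField W n s.1 i := by
    rw [pvDotA_eq_field, hl]
  have hgi : s.2.getD i 0 = pvField W n s.1 i := by
    rw [hh, PySem.List.getD_map_range]; simp [hi]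
  set new : Int := if pvDotA (W.getD i []) s.1 ≥ 0 then 1 else -1 with hnew
  have hnew2 : (if s.2.getD i 0 ≥ 0 then (1:Int) else -1) = new := by
    rw [hgi, hnew, hdot]
  have hmain : pvStepB W n s i
      = (s.1.set i new, (List.range n).map (pvField W n (s.1.set i new))) := by
    unfold pvStepB
    simp only [hnew2]
    by_cases hne : new = s.1.getD i 0
    · have hset : s.1.set i new = s.1 := by
        rw [hne]; exact pvSet_getD_self s.1 i (by omega)
      rw [if_neg (by simp [hne]), hset, hh]
    · rw [if_pos (by simpa using hne)]
      simp only [Prod.mk.injEq]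
      refine ⟨trivial, ?_⟩
      symm
      apply List.map_congr_left
      intro j hj
      have hjn : j < n := List.mem_range.mp hj
      rw [pvField_set W n s.1 hl i hi new j]
      rw [hh, PySem.List.getD_map_range]
      simp [hjn]
  refine ⟨hmain, ?_⟩
  rw [hmain]
  exact ⟨by simp [hl], rfl⟩

lemma pvSweep_agree (W : List (List Int)) (n : Nat) :
    ∀ (l : List Nat), (∀ i ∈ l, i < n) → ∀ (s : List Int × List Int), pvInv W n s →
      (l.foldl (pvStepB W n) s).1
        = l.foldl (fun e i => e.set i (if pvDotA (W.getD i []) e ≥ 0 then 1 else -1)) s.1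
      ∧ pvInv W n (l.foldl (pvStepB W n) s) := by
  intro l
  induction l with
  | nil => intro _ s hs; exact ⟨rfl, hs⟩
  | cons i t ih =>
    intro hmem s hs
    have hi : i < n := hmem i (by simp)
    obtain ⟨hstep, hinv⟩ := pvStepB_step W n s hs i hi
    have h1 : (pvStepB W n s i).1
        = s.1.set i (if pvDotA (W.getD i []) s.1 ≥ 0 then 1 else -1) := by rw [hstep]
    simp only [List.foldl_cons]
    rw [← h1]
    exact ih (fun j hj => hmem j (by simp [hj])) _ hinv

lemma pvOuter_agree (W : List (List Int)) (n : Nat) :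
    ∀ (m : Nat) (s : List Int × List Int), pvInv W n s →
      ((List.range m).foldl (fun s _ => (List.range n).foldl (pvStepB W n) s) s).1
        = (List.range m).foldl (fun e _ => pvSweepA W e) s.1
      ∧ pvInv W n ((List.range m).foldl (fun s _ => (List.range n).foldl (pvStepB W n) s) s) := by
  intro m
  induction m with
  | zero => intro s hs; exact ⟨rfl, hs⟩
  | succ k ih =>
    intro s hs
    obtain ⟨h1, h2⟩ := ih s hs
    simp only [List.range_succ, List.foldl_append, List.foldl_cons, List.foldl_nil]
    obtain ⟨h3, h4⟩ := pvSweep_agree W n (List.range n)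
      (fun j hj => List.mem_range.mp hj) _ h2
    constructor
    · rw [h3, ← h1]
      unfold pvSweepA
      rw [h2.1]
    · exact h4

-- ===== VERDICT (by name: the statement is the Claim_ definition above) =====
theorem hopfield_recall_spec : Claim_equal_hopfield_recall := by
  intro entrada W max_iter _ _
  unfold Spec_hopfield_recall hopfield_recall hopfield_recall_alt
  by_cases hm : max_iter ≤ 0
  · simp [hm, Int.toNat_of_nonpos hm]
  · simp only [hm, if_false]
    have h0 : pvInv W entrada.length (entrada, pvInitH W entrada) := by
      constructor
      · rfl
      · simp [pvInitH, pvField]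
    exact ((pvOuter_agree W entrada.length max_iter.toNat _ h0).1).symm
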